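-- pv_equiv track=rewrite | github.com/Baticsute/Handle-DES-Encryption-Decryption | DESthon.py | chartobin
-- ===== SOURCE A (Python) =====
-- def chartobin(char,size=8):
--     ord_ascii = ord(char)
--     arr = bin(ord_ascii)[2:]
--     bit_arr = []
--     while(len(arr) < size):
--         arr = "0" + arr
--     for i in arr :
--         bit_arr.append(int(i))
--     return bit_arr
-- ===== SOURCE B (Python) =====
-- def chartobin(char, size=8):
--     n = ord(char)
--     L = max(size, n.bit_length())
--     return [(n >> (L - 1 - i)) & 1 for i in range(L)]
-- ===== Notes on version B (the rewrite author's own statement) =====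
-- stated objective: alternative
-- what changed: replaces the bin()-string construction and the zero-prepending pad loop with direct arithmetic bit extraction over a computed output length
import Mathlib
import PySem

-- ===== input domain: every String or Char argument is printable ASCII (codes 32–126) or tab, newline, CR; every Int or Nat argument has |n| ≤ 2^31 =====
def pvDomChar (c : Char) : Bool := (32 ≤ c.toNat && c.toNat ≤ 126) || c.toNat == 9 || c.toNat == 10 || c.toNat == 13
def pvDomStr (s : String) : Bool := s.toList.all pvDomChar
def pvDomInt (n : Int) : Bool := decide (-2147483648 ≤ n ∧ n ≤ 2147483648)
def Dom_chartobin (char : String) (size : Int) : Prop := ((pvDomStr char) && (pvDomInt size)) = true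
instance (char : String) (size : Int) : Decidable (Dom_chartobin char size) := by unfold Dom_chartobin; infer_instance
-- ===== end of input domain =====

-- B replaces A's bin()-string building and zero-prepending pad loop by direct
-- arithmetic bit extraction over a computed output length (alternative algorithm).


-- ===== PORT A =====
-- bin(n)[2:] for n > 0: most-significant-first binary digits ('0'/'1' chars)
def binCore (n : Nat) : List Char :=
  if n = 0 then [] else binCore (n / 2) ++ [if n % 2 = 1 then '1' else '0']

-- bin(n)[2:] including the n = 0 case (bin(0)[2:] = "0")
def binStr (n : Nat) : List Char := if n = 0 then ['0'] else binCore n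

-- while len(arr) < size: arr = "0" + arr
def padLoop (size : Int) (arr : List Char) : List Char :=
  if (arr.length : Int) < size then padLoop size ('0' :: arr) else arr
termination_by (size - arr.length).toNat
decreasing_by simp at *; omega

-- for i in arr: bit_arr.append(int(i))   (int('1') = 1, int('0') = 0)
def chartobin (char : String) (size : Int) : List Int :=
  match char.toList with
  | [c] =>
    let arr := padLoop size (binStr c.toNat)
    arr.foldl (fun acc i => acc ++ [if i = '1' then (1 : Int) else 0]) []
  | _ => []  -- ord raises TypeError: excluded by Pre_chartobin

-- ===== PORT B =====
-- n.bit_length()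
def bitLen (n : Nat) : Nat := if n = 0 then 0 else Nat.log2 n + 1

-- [(n >> (L - 1 - i)) & 1 for i in range(L)]
def chartobin_alt (char : String) (size : Int) : List Int :=
  if char.toList.length = 1 then
    let n := (char.toList.headD ' ').toNat
    let L := (max size (bitLen n : Int)).toNat
    (List.range L).map (fun i => ((n >>> (L - 1 - i)) &&& 1 : Nat))
  else []  -- ord raises TypeError: excluded by Pre_chartobin

-- ===== PRECONDITION & SPEC =====
-- Pre_ excludes exactly the strings of length ≠ 1, on which Python's ord() raises TypeError.
def Pre_chartobin (char : String) (size : Int) : Prop := char.toList.length = 1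
instance (char : String) (size : Int) : Decidable (Pre_chartobin char size) := by unfold Pre_chartobin; infer_instance
def pvWitness_chartobin : String × Int := ("A", 8)

def Spec_chartobin (char : String) (size : Int) (out : List Int) : Prop := out = chartobin_alt char size
instance (char : String) (size : Int) (out : List Int) : Decidable (Spec_chartobin char size out) := by unfold Spec_chartobin; infer_instance

-- ===== CLAIM (what is proved, stated in full; the proofs are below) =====
def Claim_equal_chartobin : Prop := ∀ (char : String) (size : Int), Dom_chartobin char size → Pre_chartobin char size → Spec_chartobin char size (chartobin char size)

-- ===== LEMMAS AND PROOFS =====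

theorem padLoop_eq (size : Int) (arr : List Char) :
    padLoop size arr = List.replicate (size - arr.length).toNat '0' ++ arr := by
  fun_induction padLoop size arr with
  | case1 arr h ih =>
    rw [ih]
    have h1 : (size - (('0' :: arr).length : Int)).toNat + 1 = (size - arr.length).toNat := by
      simp; omega
    rw [← h1, List.replicate_succ']
    simp
  | case2 arr h =>
    have : (size - (arr.length : Int)).toNat = 0 := by omega
    simp [this]

theorem foldl_append_map (arr : List Char) (acc : List Int) :
    arr.foldl (fun acc i => acc ++ [if i = '1' then (1 : Int) else 0]) acc
      = acc ++ arr.map (fun i => if i = '1' then (1 : Int) else 0) := by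
  induction arr generalizing acc with
  | nil => simp
  | cons c t ih => simp [List.foldl_cons, ih]

theorem bitLen_div2 (n : Nat) (h : 1 ≤ n) : bitLen n = bitLen (n / 2) + 1 := by
  rcases Nat.lt_or_ge n 2 with h2 | h2
  · have : n = 1 := by omega
    subst this
    simp [bitLen, Nat.log2_eq_log_two, Nat.log_one_right]
  · have hn0 : n ≠ 0 := by omega
    have hd0 : n / 2 ≠ 0 := by omega
    have hdb := Nat.log_div_base 2 n
    have hpos := Nat.log_pos (b := 2) one_lt_two h2
    rw [bitLen, bitLen, if_neg hn0, if_neg hd0, Nat.log2_eq_log_two, Nat.log2_eq_log_two]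
    omega

theorem core_eq : ∀ n, 1 ≤ n →
    ((binCore n).map (fun i => if i = '1' then (1 : Int) else 0)
      = (List.range (bitLen n)).map (fun i => (((n >>> (bitLen n - 1 - i)) &&& 1 : Nat) : Int))
    ∧ (binCore n).length = bitLen n) := by
  intro n
  induction n using Nat.strong_induction_on with
  | _ n ih =>
    intro hn
    have hn0 : n ≠ 0 := by omega
    rw [binCore, if_neg hn0]
    have hbl := bitLen_div2 n hn
    rcases Nat.lt_or_ge n 2 with h2 | h2
    · have : n = 1 := by omega
      subst this
      have hb1 : bitLen 1 = 1 := by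
        simp [bitLen, Nat.log2_eq_log_two, Nat.log_one_right]
      constructor
      · simp [binCore, hb1, List.range_succ]
      · simp [binCore, hb1]
    · have hd1 : 1 ≤ n / 2 := by omega
      obtain ⟨ihm, ihl⟩ := ih (n / 2) (by omega) hd1
      constructor
      · rw [List.map_append, ihm, hbl, List.range_succ, List.map_append]
        congr 1
        · apply List.map_congr_left
          intro i hi
          rw [List.mem_range] at hi
          have he : bitLen (n / 2) + 1 - 1 - i = (bitLen (n / 2) - 1 - i) + 1 := by omega
          rw [he, Nat.add_comm (bitLen (n / 2) - 1 - i) 1, Nat.shiftRight_add]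
          have : n >>> 1 = n / 2 := by simp [Nat.shiftRight_succ, Nat.shiftRight_zero]
          rw [this]
        · have he : bitLen (n / 2) + 1 - 1 - bitLen (n / 2) = 0 := by omega
          simp only [List.map_cons, List.map_nil, he, Nat.shiftRight_zero]
          have hand : n &&& 1 = n % 2 := Nat.and_one_is_mod n
          rcases Nat.mod_two_eq_zero_or_one n with hm | hm <;>
            simp [hm, hand]
      · simp [ihl, hbl]

theorem shift_zero (n : Nat) (h : 1 ≤ n) (k : Nat) (hk : bitLen n ≤ k) :
    n >>> k = 0 := by
  have hn0 : n ≠ 0 := by omega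
  rw [bitLen, if_neg hn0] at hk
  rw [Nat.shiftRight_eq_div_pow]
  apply Nat.div_eq_of_lt
  calc n < 2 ^ (Nat.log2 n + 1) := Nat.lt_log2_self
    _ ≤ 2 ^ k := Nat.pow_le_pow_right (by norm_num) (by omega)

theorem range_map_split (n : Nat) (hn : 1 ≤ n) (d : Nat) :
    (List.range (d + bitLen n)).map
        (fun i => (((n >>> (d + bitLen n - 1 - i)) &&& 1 : Nat) : Int))
      = List.replicate d 0
        ++ (List.range (bitLen n)).map (fun i => (((n >>> (bitLen n - 1 - i)) &&& 1 : Nat) : Int)) := by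
  induction d with
  | zero => simp
  | succ d ih =>
    have hr : d + 1 + bitLen n = (d + bitLen n) + 1 := by omega
    rw [hr, List.range_succ_eq_map]
    simp only [List.map_cons, List.map_map]
    have h0 : n >>> (d + bitLen n + 1 - 1 - 0) = 0 :=
      shift_zero n hn _ (by omega)
    have hfun : ((fun i => (((n >>> (d + bitLen n + 1 - 1 - i)) &&& 1 : Nat) : Int)) ∘ Nat.succ)
        = (fun i => (((n >>> (d + bitLen n - 1 - i)) &&& 1 : Nat) : Int)) := by
      funext i
      simp only [Function.comp]
      have he : d + bitLen n + 1 - 1 - Nat.succ i = d + bitLen n - 1 - i := by omega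
      rw [he]
    rw [hfun, ih, h0]
    simp [List.replicate_succ]

-- ===== VERDICT (by name: the statement is the Claim_ definition above) =====
theorem chartobin_spec : Claim_equal_chartobin := by
  intro char size hdom hpre
  unfold Spec_chartobin
  unfold Pre_chartobin at hpre
  cases hl : char.toList with
  | nil => rw [hl] at hpre; simp at hpre
  | cons c t =>
    cases t with
    | cons c2 t2 => rw [hl] at hpre; simp at hpre
    | nil =>
      have hc : pvDomChar c = true := by
        unfold Dom_chartobin pvDomStr at hdom
        simp only [Bool.and_eq_true] at hdom
        have := hdom.1
        rw [hl] at this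
        simpa using this
      have hn1 : 1 ≤ c.toNat := by
        unfold pvDomChar at hc; simp at hc; omega
      have hn0 : c.toNat ≠ 0 := by omega
      obtain ⟨hmap, hlen⟩ := core_eq c.toNat hn1
      have hbs : binStr c.toNat = binCore c.toNat := by rw [binStr, if_neg hn0]
      have hbl1 : 1 ≤ bitLen c.toNat := by rw [bitLen, if_neg hn0]; omega
      simp only [chartobin, chartobin_alt, hl, List.length_cons, List.length_nil,
        List.headD_cons]
      rw [padLoop_eq, foldl_append_map, hbs, List.map_append, List.map_replicate, hmap, hlen]
      have hL : (max size ((bitLen c.toNat) : Int)).toNat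
          = ((size - ((bitLen c.toNat) : Int)).toNat) + bitLen c.toNat := by omega
      rw [hL, range_map_split c.toNat hn1]
      simp
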